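-- pv_equiv track=rewrite | github.com/whgusdn321/Competitive-programming | Baekjoon,SWEA, etc/프로그래머스/기둥과 보 설치.py | solution
-- ===== SOURCE A (Python) =====
-- from collections import defaultdict
--
-- def pos1(x, y, dict1, dict2):
--     if y == 0:
--         return True
--     if dict1[(x, y-1)]:
--         return True
--     if dict2[(x, y)] or dict2[(x-1, y)]:
--         return True
--     return False
--
-- def pos2(x, y, dict1, dict2):
--     if dict1[(x, y-1)] or dict1[(x+1, y-1)]:
--         return True
--     if dict2[(x-1, y)] and dict2[(x+1, y)]:
--         return True
--     return False
--
-- def solution(n, build_frame):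
--     answer = []
--     dict1 = defaultdict(bool)
--     dict2 = defaultdict(bool)
--     for x, y, a, b in build_frame:
--         if b:
--             if a == 0:
--                 if pos1(x, y, dict1, dict2):
--                     dict1[(x, y)] = True
--             else:
--                 if pos2(x, y, dict1, dict2):
--                     dict2[(x, y)] = True
--         else:  # delete
--             pos = True
--             if a == 0:
--                 dict1[(x, y)] = False
--                 if dict1[(x, y+1)]:
--                     pos &= pos1(x, y+1, dict1, dict2)
--                 if dict2[(x, y+1)]:
--                     pos &= pos2(x, y+1, dict1, dict2)
--                 if dict2[(x-1, y+1)]: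
--                     pos &= pos2(x-1, y+1, dict1, dict2)
--                 if not pos:
--                     dict1[(x, y)] = True
--             else:  # a == 1
--                 dict2[(x, y)] = False
--                 if dict1[(x, y)]:
--                     pos &= pos1(x, y, dict1, dict2)
--                 if dict1[(x+1, y)]:
--                     pos &= pos1(x+1, y, dict1, dict2)
--                 if dict2[(x-1, y)]:
--                     pos &= pos2(x-1, y, dict1, dict2)
--                 if dict2[(x+1, y)]:
--                     pos &= pos2(x+1, y, dict1, dict2)
--                 if not pos:
--                     dict2[(x, y)] = True
--     for x, y in dict2:
--         if dict2[(x, y)]: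
--             answer.append([x, y, 1])
--     for x, y in dict1:
--         if dict1[(x, y)]:
--             answer.append([x, y, 0])
--     answer.sort(key=lambda x:(x[0], x[1], x[2]))
--     return answer
-- ===== SOURCE B (Python) =====
-- def solution(n, build_frame):
--     # Set of installed structures as (x, y, kind) with kind normalized to 0/1.
--     S = set()
--
--     def ok(item):
--         x, y, kind = item
--         if kind == 0:  # pillar
--             return (y == 0 or (x, y - 1, 0) in S
--                     or (x, y, 1) in S or (x - 1, y, 1) in S)
--         # beam
--         return ((x, y - 1, 0) in S or (x + 1, y - 1, 0) in S
--                 or ((x - 1, y, 1) in S and (x + 1, y, 1) in S))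
--
--     for x, y, a, b in build_frame:
--         item = (x, y, 0 if a == 0 else 1)
--         if b:  # install, keep only if the whole structure stays valid
--             S.add(item)
--             if not all(ok(it) for it in S):
--                 S.discard(item)
--         else:  # delete, roll back if anything became unsupported
--             S.discard(item)
--             if not all(ok(it) for it in S):
--                 S.add(item)
--     return sorted([x, y, kind] for (x, y, kind) in S)
-- ===== Notes on version B (the rewrite author's own statement) =====
-- stated objective: simpler
-- what changed: Replaces A's two boolean defaultdicts with hand-written per-neighbour re-checks after a delete by a single set of (x, y, kind) triples with one validity predicate that is re-checked over the whole structure after every add/remove, rolling back when it fails.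
import Mathlib
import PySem

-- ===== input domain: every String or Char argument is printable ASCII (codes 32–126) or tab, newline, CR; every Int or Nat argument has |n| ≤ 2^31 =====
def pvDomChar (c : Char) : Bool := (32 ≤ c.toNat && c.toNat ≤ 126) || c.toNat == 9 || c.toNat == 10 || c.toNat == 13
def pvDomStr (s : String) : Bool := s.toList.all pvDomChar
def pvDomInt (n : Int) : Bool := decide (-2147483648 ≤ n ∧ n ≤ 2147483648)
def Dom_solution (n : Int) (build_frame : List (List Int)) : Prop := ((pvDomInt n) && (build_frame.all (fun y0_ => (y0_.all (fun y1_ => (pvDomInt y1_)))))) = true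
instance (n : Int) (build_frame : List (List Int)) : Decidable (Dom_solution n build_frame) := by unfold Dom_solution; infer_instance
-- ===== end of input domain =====

-- B replaces A's two boolean defaultdicts and hand-written local re-checks after a delete by a single
-- set of installed (x, y, kind) triples with one validity predicate re-checked over the whole
-- structure (objective: simpler). Equivalence is proved on inputs whose frames have length 4.

-- ===== PORT A =====
-- defaultdict(bool) reads are modelled by getD · false: a read of a missing key stores False in
-- Python, which never changes any later read, and the returned answer filters True entries and is
-- sorted, so the extra False keys are unobservable in the return value (which is what is claimed).
def pos1 (x y : Int) (dict1 dict2 : PySem.Dict (Int × Int) Bool) : Bool :=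
  if y = 0 then true
  else if dict1.getD (x, y-1) false then true
  else if dict2.getD (x, y) false || dict2.getD (x-1, y) false then true
  else false

def pos2 (x y : Int) (dict1 dict2 : PySem.Dict (Int × Int) Bool) : Bool :=
  if dict1.getD (x, y-1) false || dict1.getD (x+1, y-1) false then true
  else if dict2.getD (x-1, y) false && dict2.getD (x+1, y) false then true
  else false

-- the four branch bodies of A's loop, as helpers (the code is A's, block for block)
def buildPillarA (x y : Int) (d1 d2 : PySem.Dict (Int × Int) Bool) :
    PySem.Dict (Int × Int) Bool × PySem.Dict (Int × Int) Bool :=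
  if pos1 x y d1 d2 then (d1.insert (x, y) true, d2) else (d1, d2)

def buildBeamA (x y : Int) (d1 d2 : PySem.Dict (Int × Int) Bool) :
    PySem.Dict (Int × Int) Bool × PySem.Dict (Int × Int) Bool :=
  if pos2 x y d1 d2 then (d1, d2.insert (x, y) true) else (d1, d2)

def delPillarA (x y : Int) (d1 d2 : PySem.Dict (Int × Int) Bool) :
    PySem.Dict (Int × Int) Bool × PySem.Dict (Int × Int) Bool :=
  let d1' := d1.insert (x, y) false
  let pos := true
  let pos := if d1'.getD (x, y+1) false then pos && pos1 x (y+1) d1' d2 else pos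
  let pos := if d2.getD (x, y+1) false then pos && pos2 x (y+1) d1' d2 else pos
  let pos := if d2.getD (x-1, y+1) false then pos && pos2 (x-1) (y+1) d1' d2 else pos
  if !pos then (d1'.insert (x, y) true, d2) else (d1', d2)

def delBeamA (x y : Int) (d1 d2 : PySem.Dict (Int × Int) Bool) :
    PySem.Dict (Int × Int) Bool × PySem.Dict (Int × Int) Bool :=
  let d2' := d2.insert (x, y) false
  let pos := true
  let pos := if d1.getD (x, y) false then pos && pos1 x y d1 d2' else pos
  let pos := if d1.getD (x+1, y) false then pos && pos1 (x+1) y d1 d2' else pos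
  let pos := if d2'.getD (x-1, y) false then pos && pos2 (x-1) y d1 d2' else pos
  let pos := if d2'.getD (x+1, y) false then pos && pos2 (x+1) y d1 d2' else pos
  if !pos then (d1, d2'.insert (x, y) true) else (d1, d2')

def stepA (st : PySem.Dict (Int × Int) Bool × PySem.Dict (Int × Int) Bool) (f : List Int) :
    PySem.Dict (Int × Int) Bool × PySem.Dict (Int × Int) Bool :=
  match f with
  | [x, y, a, b] =>
    if b ≠ 0 then
      if a = 0 then buildPillarA x y st.1 st.2 else buildBeamA x y st.1 st.2
    else
      if a = 0 then delPillarA x y st.1 st.2 else delBeamA x y st.1 st.2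
  | _ => st  -- a frame of length ≠ 4 makes the Python unpacking raise: excluded by Pre_solution

-- 'answer.sort(key=lambda x:(x[0],x[1],x[2]))': each entry is a length-3 list, on which Python's
-- tuple key order coincides with Python's (and Lean's lexicographic) list order, so the key is id.
def solution (n : Int) (build_frame : List (List Int)) : List (List Int) :=
  let st := build_frame.foldl stepA (PySem.Dict.empty, PySem.Dict.empty)
  let answer : List (List Int) :=
    st.2.items.foldl (fun acc kv => if kv.2 then acc ++ [[kv.1.1, kv.1.2, 1]] else acc) []
  let answer :=
    st.1.items.foldl (fun acc kv => if kv.2 then acc ++ [[kv.1.1, kv.1.2, 0]] else acc) answer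
  PySem.List.sorted answer (fun l => l) false

-- ===== PORT B =====
def okItem (S : PySem.Set (Int × Int × Int)) (item : Int × Int × Int) : Bool :=
  let x := item.1
  let y := item.2.1
  if item.2.2 = 0 then  -- pillar
    decide (y = 0) || S.contains (x, y-1, 0) || S.contains (x, y, 1) || S.contains (x-1, y, 1)
  else  -- beam
    S.contains (x, y-1, 0) || S.contains (x+1, y-1, 0) ||
      (S.contains (x-1, y, 1) && S.contains (x+1, y, 1))

def installB (S : PySem.Set (Int × Int × Int)) (item : Int × Int × Int) :
    PySem.Set (Int × Int × Int) :=
  let S1 := S.add item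
  if S1.all (okItem S1) then S1 else S1.discard item

def deleteB (S : PySem.Set (Int × Int × Int)) (item : Int × Int × Int) :
    PySem.Set (Int × Int × Int) :=
  let S1 := S.discard item
  if S1.all (okItem S1) then S1 else S1.add item

def stepB (S : PySem.Set (Int × Int × Int)) (f : List Int) : PySem.Set (Int × Int × Int) :=
  match f with
  | [x, y, a, b] =>
    let item : Int × Int × Int := (x, y, if a = 0 then 0 else 1)
    if b ≠ 0 then installB S item else deleteB S item
  | _ => S  -- a frame of length ≠ 4 makes the Python unpacking raise: excluded by Pre_solution

def solution_alt (n : Int) (build_frame : List (List Int)) : List (List Int) :=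
  let S := build_frame.foldl stepB PySem.Set.empty
  PySem.List.sorted (S.map (fun e => [e.1, e.2.1, e.2.2])) (fun l => l) false

-- ===== PRECONDITION & SPEC =====
-- Pre_solution: every frame has exactly 4 entries; on any other frame the Python 'for x, y, a, b
-- in build_frame' raises ValueError in both A and B.
def Pre_solution (n : Int) (build_frame : List (List Int)) : Prop :=
  ∀ f ∈ build_frame, f.length = 4
instance (n : Int) (build_frame : List (List Int)) : Decidable (Pre_solution n build_frame) := by
  unfold Pre_solution; infer_instance
def pvWitness_solution : Int × List (List Int) :=
  (5, [[0, 0, 0, 1], [1, 0, 0, 1], [0, 1, 1, 1], [0, 1, 1, 0], [0, 0, 0, 0]])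

def Spec_solution (n : Int) (build_frame : List (List Int)) (out : List (List Int)) : Prop :=
  out = solution_alt n build_frame
instance (n : Int) (build_frame : List (List Int)) (out : List (List Int)) :
    Decidable (Spec_solution n build_frame out) := by unfold Spec_solution; infer_instance

-- ===== CLAIM (what is proved, stated in full; the proofs are below) =====
def Claim_equal_solution : Prop := ∀ (n : Int) (build_frame : List (List Int)),
  Dom_solution n build_frame → Pre_solution n build_frame →
  Spec_solution n build_frame (solution n build_frame)

-- ===== LEMMAS AND PROOFS =====

abbrev Tri : Type := Int × Int × Int
abbrev Dct : Type := PySem.Dict (Int × Int) Bool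
abbrev SetT : Type := PySem.Set Tri

-- DRel: the coupling invariant between A's dictionary pair and B's set of triples:
-- same membership, unique keys/elements, every installed triple has kind 0/1 and is supported.
def DRel (st : Dct × Dct) (S : SetT) : Prop :=
  st.1.keys.Nodup ∧ st.2.keys.Nodup ∧ (S : List Tri).Nodup ∧
  (∀ p : Int × Int, st.1.getD p false = S.contains (p.1, p.2, 0)) ∧
  (∀ p : Int × Int, st.2.getD p false = S.contains (p.1, p.2, 1)) ∧
  (∀ e ∈ (S : List Tri), e.2.2 = 0 ∨ e.2.2 = 1) ∧
  (∀ e ∈ (S : List Tri), okItem S e = true)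

theorem mem_iff_contains (S : SetT) (t : Tri) : t ∈ (S : List Tri) ↔ S.contains t = true :=
  (PySem.Set.contains_iff S t).symm

theorem contains_add' (S : SetT) (x t : Tri) :
    (S.add x).contains t = (S.contains t || decide (t = x)) := by
  rw [Bool.eq_iff_iff]
  simp [PySem.Set.contains_iff, PySem.Set.mem_add]

theorem contains_discard' (S : SetT) (x t : Tri) :
    (S.discard x).contains t = (S.contains t && !decide (t = x)) := by
  rw [Bool.eq_iff_iff]
  simp [PySem.Set.contains_iff, PySem.Set.mem_discard]

theorem okCongr (S T : SetT) (h : ∀ t, S.contains t = T.contains t) (e : Tri) :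
    okItem S e = okItem T e := by
  simp only [okItem, h]

theorem okMono (S T : SetT) (h : ∀ t, S.contains t = true → T.contains t = true) (e : Tri)
    (he : okItem S e = true) : okItem T e = true := by
  obtain ⟨u, v, k⟩ := e
  by_cases hk : k = 0 <;>
    simp only [okItem, hk, if_true, if_neg, reduceIte] <;>
    simp only [okItem, hk, if_true, if_neg, reduceIte] at he <;>
    simp only [Bool.or_eq_true, Bool.and_eq_true, decide_eq_true_eq] at he ⊢ <;>
    tauto

theorem valid_congr (X Y : SetT) (h : ∀ t, X.contains t = Y.contains t)
    (hv : ∀ e ∈ (Y : List Tri), okItem Y e = true) :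
    ∀ e ∈ (X : List Tri), okItem X e = true := by
  intro e he
  rw [okCongr X Y h e]
  refine hv e ?_
  rw [mem_iff_contains, ← h e, ← mem_iff_contains]
  exact he

-- ite-shape helpers for A's guarded 'pos &= check' accumulation
theorem gt_chain (g c p : Bool) (h : g = true → c = true) (hp : p = true) :
    (if g = true then p && c else p) = true := by
  cases g
  · simpa using hp
  · simp [hp, h rfl]

theorem gf_top (g c p : Bool) (hg : g = true) (hc : c = false) :
    (if g = true then p && c else p) = false := by
  rw [if_pos hg, hc]; simp

theorem gf_prop (g c p : Bool) (hp : p = false) :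
    (if g = true then p && c else p) = false := by
  cases g <;> simp [hp]

-- locality: a membership change at a pillar position (px, py) cannot affect the validity of any
-- installed triple other than the three A re-checks after deleting that pillar
theorem ok_changed_pillar (S T : SetT) (px py : Int)
    (h : ∀ t : Tri, t ≠ (px, py, 0) → S.contains t = T.contains t) (e : Tri)
    (hk : e.2.2 = 0 ∨ e.2.2 = 1) (h0 : e ≠ (px, py+1, 0)) (h1 : e ≠ (px, py+1, 1))
    (h2 : e ≠ (px-1, py+1, 1)) : okItem S e = okItem T e := by
  obtain ⟨u, v, k⟩ := e
  simp only at hk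
  rcases hk with hk | hk <;> subst hk
  · have r1 : S.contains (u, v-1, 0) = T.contains (u, v-1, 0) := h _ (by
      intro hEq; apply h0; simp only [Prod.mk.injEq] at hEq ⊢
      obtain ⟨e1, e2, -⟩ := hEq
      exact ⟨by omega, by omega, trivial⟩)
    have r2 : S.contains (u, v, 1) = T.contains (u, v, 1) := h _ (by
      intro hEq; simp only [Prod.mk.injEq] at hEq; omega)
    have r3 : S.contains (u-1, v, 1) = T.contains (u-1, v, 1) := h _ (by
      intro hEq; simp only [Prod.mk.injEq] at hEq; omega)
    show (decide (v = 0) || S.contains (u, v-1, 0) || S.contains (u, v, 1) ||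
        S.contains (u-1, v, 1))
      = (decide (v = 0) || T.contains (u, v-1, 0) || T.contains (u, v, 1) ||
        T.contains (u-1, v, 1))
    rw [r1, r2, r3]
  · have r1 : S.contains (u, v-1, 0) = T.contains (u, v-1, 0) := h _ (by
      intro hEq; apply h1; simp only [Prod.mk.injEq] at hEq ⊢
      obtain ⟨e1, e2, -⟩ := hEq
      exact ⟨by omega, by omega, trivial⟩)
    have r2 : S.contains (u+1, v-1, 0) = T.contains (u+1, v-1, 0) := h _ (by
      intro hEq; apply h2; simp only [Prod.mk.injEq] at hEq ⊢
      obtain ⟨e1, e2, -⟩ := hEq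
      exact ⟨by omega, by omega, trivial⟩)
    have r3 : S.contains (u-1, v, 1) = T.contains (u-1, v, 1) := h _ (by
      intro hEq; simp only [Prod.mk.injEq] at hEq; omega)
    have r4 : S.contains (u+1, v, 1) = T.contains (u+1, v, 1) := h _ (by
      intro hEq; simp only [Prod.mk.injEq] at hEq; omega)
    show (S.contains (u, v-1, 0) || S.contains (u+1, v-1, 0) ||
        (S.contains (u-1, v, 1) && S.contains (u+1, v, 1)))
      = (T.contains (u, v-1, 0) || T.contains (u+1, v-1, 0) ||
        (T.contains (u-1, v, 1) && T.contains (u+1, v, 1)))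
    rw [r1, r2, r3, r4]

-- locality for a membership change at a beam position (px, py)
theorem ok_changed_beam (S T : SetT) (px py : Int)
    (h : ∀ t : Tri, t ≠ (px, py, 1) → S.contains t = T.contains t) (e : Tri)
    (hk : e.2.2 = 0 ∨ e.2.2 = 1) (h0 : e ≠ (px, py, 0)) (h1 : e ≠ (px+1, py, 0))
    (h2 : e ≠ (px-1, py, 1)) (h3 : e ≠ (px+1, py, 1)) : okItem S e = okItem T e := by
  obtain ⟨u, v, k⟩ := e
  simp only at hk
  rcases hk with hk | hk <;> subst hk
  · have r1 : S.contains (u, v-1, 0) = T.contains (u, v-1, 0) := h _ (by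
      intro hEq; simp only [Prod.mk.injEq] at hEq; omega)
    have r2 : S.contains (u, v, 1) = T.contains (u, v, 1) := h _ (by
      intro hEq; apply h0; simp only [Prod.mk.injEq] at hEq ⊢
      obtain ⟨e1, e2, -⟩ := hEq
      exact ⟨by omega, by omega, trivial⟩)
    have r3 : S.contains (u-1, v, 1) = T.contains (u-1, v, 1) := h _ (by
      intro hEq; apply h1; simp only [Prod.mk.injEq] at hEq ⊢
      obtain ⟨e1, e2, -⟩ := hEq
      exact ⟨by omega, by omega, trivial⟩)
    show (decide (v = 0) || S.contains (u, v-1, 0) || S.contains (u, v, 1) ||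
        S.contains (u-1, v, 1))
      = (decide (v = 0) || T.contains (u, v-1, 0) || T.contains (u, v, 1) ||
        T.contains (u-1, v, 1))
    rw [r1, r2, r3]
  · have r1 : S.contains (u, v-1, 0) = T.contains (u, v-1, 0) := h _ (by
      intro hEq; simp only [Prod.mk.injEq] at hEq; omega)
    have r2 : S.contains (u+1, v-1, 0) = T.contains (u+1, v-1, 0) := h _ (by
      intro hEq; simp only [Prod.mk.injEq] at hEq; omega)
    have r3 : S.contains (u-1, v, 1) = T.contains (u-1, v, 1) := h _ (by
      intro hEq; apply h3; simp only [Prod.mk.injEq] at hEq ⊢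
      obtain ⟨e1, e2, -⟩ := hEq
      exact ⟨by omega, by omega, trivial⟩)
    have r4 : S.contains (u+1, v, 1) = T.contains (u+1, v, 1) := h _ (by
      intro hEq; apply h2; simp only [Prod.mk.injEq] at hEq ⊢
      obtain ⟨e1, e2, -⟩ := hEq
      exact ⟨by omega, by omega, trivial⟩)
    show (S.contains (u, v-1, 0) || S.contains (u+1, v-1, 0) ||
        (S.contains (u-1, v, 1) && S.contains (u+1, v, 1)))
      = (T.contains (u, v-1, 0) || T.contains (u+1, v-1, 0) ||
        (T.contains (u-1, v, 1) && T.contains (u+1, v, 1)))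
    rw [r1, r2, r3, r4]

theorem pos1_eq (x y : Int) (d1 d2 : Dct) (S : SetT)
    (h1 : ∀ p : Int × Int, d1.getD p false = S.contains (p.1, p.2, 0))
    (h2 : ∀ p : Int × Int, d2.getD p false = S.contains (p.1, p.2, 1)) :
    pos1 x y d1 d2 = okItem S (x, y, 0) := by
  have a1 : d1.getD (x, y-1) false = S.contains (x, y-1, 0) := h1 (x, y-1)
  have a2 : d2.getD (x, y) false = S.contains (x, y, 1) := h2 (x, y)
  have a3 : d2.getD (x-1, y) false = S.contains (x-1, y, 1) := h2 (x-1, y)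
  by_cases hy : y = 0 <;>
    cases hc1 : S.contains (x, y-1, 0) <;>
    cases hc2 : S.contains (x, y, 1) <;>
    cases hc3 : S.contains (x-1, y, 1) <;>
    simp [pos1, okItem, hy, a1, a2, a3, hc1, hc2, hc3, Bool.or_assoc]

theorem pos2_eq (x y : Int) (d1 d2 : Dct) (S : SetT)
    (h1 : ∀ p : Int × Int, d1.getD p false = S.contains (p.1, p.2, 0))
    (h2 : ∀ p : Int × Int, d2.getD p false = S.contains (p.1, p.2, 1)) :
    pos2 x y d1 d2 = okItem S (x, y, 1) := by
  have a1 : d1.getD (x, y-1) false = S.contains (x, y-1, 0) := h1 (x, y-1)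
  have a2 : d1.getD (x+1, y-1) false = S.contains (x+1, y-1, 0) := h1 (x+1, y-1)
  have a3 : d2.getD (x-1, y) false = S.contains (x-1, y, 1) := h2 (x-1, y)
  have a4 : d2.getD (x+1, y) false = S.contains (x+1, y, 1) := h2 (x+1, y)
  cases hc1 : S.contains (x, y-1, 0) <;>
    cases hc2 : S.contains (x+1, y-1, 0) <;>
    cases hc3 : S.contains (x-1, y, 1) <;>
    cases hc4 : S.contains (x+1, y, 1) <;>
    simp [pos2, okItem, a1, a2, a3, a4, hc1, hc2, hc3, hc4, Bool.or_assoc]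

theorem rel_build_pillar (x y : Int) (d1 d2 : Dct) (S : SetT) (h : DRel (d1, d2) S) :
    DRel (buildPillarA x y d1 d2) (installB S (x, y, 0)) := by
  obtain ⟨hk1, hk2, hnd, hm1, hm2, hkind, hval⟩ := h
  have hgrow : ∀ t, S.contains t = true → (S.add (x, y, 0)).contains t = true := by
    intro t ht; rw [contains_add', ht]; rfl
  have hsame : ∀ t : Tri, t ≠ ((x : Int), y, (0 : Int)) → (S.add (x, y, 0)).contains t = S.contains t := by
    intro t ht; rw [contains_add']; simp [ht]
  have hself : okItem (S.add (x, y, 0)) (x, y, 0) = okItem S (x, y, 0) := by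
    refine ok_changed_pillar _ _ x y (fun t ht => hsame t ht) (x, y, 0) (Or.inl rfl) ?_ ?_ ?_
    · intro hEq; simp only [Prod.mk.injEq] at hEq; omega
    · intro hEq; simp only [Prod.mk.injEq] at hEq; omega
    · intro hEq; simp only [Prod.mk.injEq] at hEq; omega
  have hpos1 : pos1 x y d1 d2 = okItem S (x, y, 0) := pos1_eq x y d1 d2 S hm1 hm2
  simp only [buildPillarA, installB]
  by_cases hc : okItem S (x, y, 0) = true
  · have hposT : pos1 x y d1 d2 = true := by rw [hpos1]; exact hc
    have hall : (S.add (x, y, 0)).all (okItem (S.add (x, y, 0))) = true := by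
      rw [List.all_eq_true]
      intro e he
      rcases (PySem.Set.mem_add S _ e).mp he with h' | h'
      · exact okMono S _ hgrow e (hval e h')
      · subst h'; rw [hself]; exact hc
    rw [if_pos hposT, if_pos hall]
    refine ⟨PySem.Dict.nodup_keys_insert _ _ _ hk1, hk2, PySem.Set.nodup_add _ _ hnd, ?_, ?_, ?_, ?_⟩
    · intro p
      obtain ⟨pu, pv⟩ := p
      rw [PySem.Dict.getD_insert, contains_add']
      by_cases hp : ((pu, pv) : Int × Int) = (x, y)
      · rw [if_pos hp]
        have hEq3 : ((pu, pv, 0) : Tri) = (x, y, 0) := by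
          simp only [Prod.mk.injEq] at hp ⊢; exact ⟨hp.1, hp.2, trivial⟩
        simp [hEq3]
      · rw [if_neg hp]
        have hne3 : ¬(((pu, pv, 0) : Tri) = (x, y, 0)) := by
          intro hEq; apply hp; simp only [Prod.mk.injEq] at hEq ⊢; exact ⟨hEq.1, hEq.2.1⟩
        simp [hne3, hm1 (pu, pv)]
    · intro p
      obtain ⟨pu, pv⟩ := p
      rw [contains_add']
      have hne3 : ¬(((pu, pv, 1) : Tri) = (x, y, 0)) := by
        intro hEq; simp only [Prod.mk.injEq] at hEq; omega
      simp [hne3, hm2 (pu, pv)]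
    · intro e he
      rcases (PySem.Set.mem_add S _ e).mp he with h' | h'
      · exact hkind e h'
      · subst h'; left; rfl
    · exact List.all_eq_true.mp hall
  · have hposF : ¬(pos1 x y d1 d2 = true) := by rw [hpos1]; exact hc
    have hnm : ((x, y, 0) : Tri) ∉ (S : List Tri) := fun hmem => hc (hval _ hmem)
    have hallf : ¬((S.add (x, y, 0)).all (okItem (S.add (x, y, 0))) = true) := by
      intro hall
      exact hc (hself ▸ List.all_eq_true.mp hall (x, y, 0)
        ((PySem.Set.mem_add _ _ _).mpr (Or.inr rfl)))
    have hdisc : (S.add ((x, y, 0) : Tri)).discard (x, y, 0) = S := by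
      rw [PySem.Set.add_of_not_mem hnm]
      have hf : ∀ e ∈ (S : List Tri), (!(e == ((x : Int), y, (0 : Int)))) = true := by
        intro e he
        simp only [Bool.not_eq_true', beq_eq_false_iff_ne, ne_eq]
        intro hEq; exact hnm (hEq ▸ he)
      simp [PySem.Set.discard, List.filter_append, List.filter_eq_self.mpr hf]
    rw [if_neg hposF, if_neg hallf, hdisc]
    exact ⟨hk1, hk2, hnd, hm1, hm2, hkind, hval⟩

theorem rel_build_beam (x y : Int) (d1 d2 : Dct) (S : SetT) (h : DRel (d1, d2) S) :
    DRel (buildBeamA x y d1 d2) (installB S (x, y, 1)) := by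
  obtain ⟨hk1, hk2, hnd, hm1, hm2, hkind, hval⟩ := h
  have hgrow : ∀ t, S.contains t = true → (S.add (x, y, 1)).contains t = true := by
    intro t ht; rw [contains_add', ht]; rfl
  have hsame : ∀ t : Tri, t ≠ ((x : Int), y, (1 : Int)) → (S.add (x, y, 1)).contains t = S.contains t := by
    intro t ht; rw [contains_add']; simp [ht]
  have hself : okItem (S.add (x, y, 1)) (x, y, 1) = okItem S (x, y, 1) := by
    refine ok_changed_beam _ _ x y (fun t ht => hsame t ht) (x, y, 1) (Or.inr rfl) ?_ ?_ ?_ ?_ <;>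
      · intro hEq; simp only [Prod.mk.injEq] at hEq; omega
  have hpos2 : pos2 x y d1 d2 = okItem S (x, y, 1) := pos2_eq x y d1 d2 S hm1 hm2
  simp only [buildBeamA, installB]
  by_cases hc : okItem S (x, y, 1) = true
  · have hposT : pos2 x y d1 d2 = true := by rw [hpos2]; exact hc
    have hall : (S.add (x, y, 1)).all (okItem (S.add (x, y, 1))) = true := by
      rw [List.all_eq_true]
      intro e he
      rcases (PySem.Set.mem_add S _ e).mp he with h' | h'
      · exact okMono S _ hgrow e (hval e h')
      · subst h'; rw [hself]; exact hc
    rw [if_pos hposT, if_pos hall]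
    refine ⟨hk1, PySem.Dict.nodup_keys_insert _ _ _ hk2, PySem.Set.nodup_add _ _ hnd, ?_, ?_, ?_, ?_⟩
    · intro p
      obtain ⟨pu, pv⟩ := p
      rw [contains_add']
      have hne3 : ¬(((pu, pv, 0) : Tri) = (x, y, 1)) := by
        intro hEq; simp only [Prod.mk.injEq] at hEq; omega
      simp [hne3, hm1 (pu, pv)]
    · intro p
      obtain ⟨pu, pv⟩ := p
      rw [PySem.Dict.getD_insert, contains_add']
      by_cases hp : ((pu, pv) : Int × Int) = (x, y)
      · rw [if_pos hp]
        have hEq3 : ((pu, pv, 1) : Tri) = (x, y, 1) := by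
          simp only [Prod.mk.injEq] at hp ⊢; exact ⟨hp.1, hp.2, trivial⟩
        simp [hEq3]
      · rw [if_neg hp]
        have hne3 : ¬(((pu, pv, 1) : Tri) = (x, y, 1)) := by
          intro hEq; apply hp; simp only [Prod.mk.injEq] at hEq ⊢; exact ⟨hEq.1, hEq.2.1⟩
        simp [hne3, hm2 (pu, pv)]
    · intro e he
      rcases (PySem.Set.mem_add S _ e).mp he with h' | h'
      · exact hkind e h'
      · subst h'; right; rfl
    · exact List.all_eq_true.mp hall
  · have hposF : ¬(pos2 x y d1 d2 = true) := by rw [hpos2]; exact hc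
    have hnm : ((x, y, 1) : Tri) ∉ (S : List Tri) := fun hmem => hc (hval _ hmem)
    have hallf : ¬((S.add (x, y, 1)).all (okItem (S.add (x, y, 1))) = true) := by
      intro hall
      exact hc (hself ▸ List.all_eq_true.mp hall (x, y, 1)
        ((PySem.Set.mem_add _ _ _).mpr (Or.inr rfl)))
    have hdisc : (S.add ((x, y, 1) : Tri)).discard (x, y, 1) = S := by
      rw [PySem.Set.add_of_not_mem hnm]
      have hf : ∀ e ∈ (S : List Tri), (!(e == ((x : Int), y, (1 : Int)))) = true := by
        intro e he
        simp only [Bool.not_eq_true', beq_eq_false_iff_ne, ne_eq]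
        intro hEq; exact hnm (hEq ▸ he)
      simp [PySem.Set.discard, List.filter_append, List.filter_eq_self.mpr hf]
    rw [if_neg hposF, if_neg hallf, hdisc]
    exact ⟨hk1, hk2, hnd, hm1, hm2, hkind, hval⟩

theorem rel_del_pillar (x y : Int) (d1 d2 : Dct) (S : SetT) (h : DRel (d1, d2) S) :
    DRel (delPillarA x y d1 d2) (deleteB S (x, y, 0)) := by
  obtain ⟨hk1, hk2, hnd, hm1, hm2, hkind, hval⟩ := h
  set S' : SetT := S.discard (x, y, 0) with hS'def
  have hsame : ∀ t : Tri, t ≠ ((x : Int), y, (0 : Int)) → S'.contains t = S.contains t := by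
    intro t ht; rw [hS'def, contains_discard']; simp [ht]
  have hm1' : ∀ p : Int × Int, (d1.insert (x, y) false).getD p false = S'.contains (p.1, p.2, 0) := by
    intro p; obtain ⟨pu, pv⟩ := p
    rw [PySem.Dict.getD_insert]
    by_cases hp : ((pu, pv) : Int × Int) = (x, y)
    · rw [if_pos hp, hS'def, contains_discard']
      have hEq3 : ((pu, pv, 0) : Tri) = (x, y, 0) := by
        simp only [Prod.mk.injEq] at hp ⊢; exact ⟨hp.1, hp.2, trivial⟩
      simp [hEq3]
    · rw [if_neg hp, hsame _ (by
        intro hEq; apply hp; simp only [Prod.mk.injEq] at hEq ⊢; exact ⟨hEq.1, hEq.2.1⟩)]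
      exact hm1 (pu, pv)
  have hm2' : ∀ p : Int × Int, d2.getD p false = S'.contains (p.1, p.2, 1) := by
    intro p; obtain ⟨pu, pv⟩ := p
    rw [hsame _ (by intro hEq; simp only [Prod.mk.injEq] at hEq; omega)]
    exact hm2 (pu, pv)
  have hndS' : (S' : List Tri).Nodup := PySem.Set.nodup_discard _ _ hnd
  have hsubS : ∀ e : Tri, e ∈ (S' : List Tri) → e ∈ (S : List Tri) := by
    intro e he; exact ((PySem.Set.mem_discard _ _ _).mp he).1
  have hkind' : ∀ e ∈ (S' : List Tri), e.2.2 = 0 ∨ e.2.2 = 1 := fun e he => hkind e (hsubS e he)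
  have hg1 : (d1.insert (x, y) false).getD (x, y+1) false = S'.contains (x, y+1, 0) := hm1' (x, y+1)
  have hg2 : d2.getD (x, y+1) false = S'.contains (x, y+1, 1) := hm2' (x, y+1)
  have hg3 : d2.getD (x-1, y+1) false = S'.contains (x-1, y+1, 1) := hm2' (x-1, y+1)
  have hcc1 : pos1 x (y+1) (d1.insert (x, y) false) d2 = okItem S' (x, y+1, 0) :=
    pos1_eq _ _ _ _ _ hm1' hm2'
  have hcc2 : pos2 x (y+1) (d1.insert (x, y) false) d2 = okItem S' (x, y+1, 1) :=
    pos2_eq _ _ _ _ _ hm1' hm2'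
  have hcc3 : pos2 (x-1) (y+1) (d1.insert (x, y) false) d2 = okItem S' (x-1, y+1, 1) :=
    pos2_eq _ _ _ _ _ hm1' hm2'
  simp only [delPillarA, deleteB]
  rw [← hS'def, hg1, hg2, hg3, hcc1, hcc2, hcc3]
  by_cases hall : S'.all (okItem S') = true
  · have hA : ∀ e ∈ (S' : List Tri), okItem S' e = true := List.all_eq_true.mp hall
    have hkeep : DRel (d1.insert (x, y) false, d2) S' :=
      ⟨PySem.Dict.nodup_keys_insert _ _ _ hk1, hk2, hndS', hm1', hm2', hkind', hA⟩
    have k1 : S'.contains (x, y+1, 0) = true → okItem S' (x, y+1, 0) = true :=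
      fun hbb => hA _ ((PySem.Set.contains_iff _ _).mp hbb)
    have k2 : S'.contains (x, y+1, 1) = true → okItem S' (x, y+1, 1) = true :=
      fun hbb => hA _ ((PySem.Set.contains_iff _ _).mp hbb)
    have k3 : S'.contains (x-1, y+1, 1) = true → okItem S' (x-1, y+1, 1) = true :=
      fun hbb => hA _ ((PySem.Set.contains_iff _ _).mp hbb)
    have hp1 : (if S'.contains (x, y+1, 0) = true then true && okItem S' (x, y+1, 0) else true)
        = true := gt_chain _ _ _ k1 rfl
    have hp2 : _ = true := gt_chain (S'.contains (x, y+1, 1)) (okItem S' (x, y+1, 1)) _ k2 hp1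
    have hp3 : _ = true := gt_chain (S'.contains (x-1, y+1, 1)) (okItem S' (x-1, y+1, 1)) _ k3 hp2
    rw [hp3, if_neg (by simp : ¬((!true) = true)), if_pos hall]
    exact hkeep
  · have hmemItem : ((x, y, 0) : Tri) ∈ (S : List Tri) := by
      by_contra hnm
      apply hall
      rw [List.all_eq_true]
      have hsame0 : ∀ t : Tri, S'.contains t = S.contains t := by
        intro t
        by_cases ht : t = ((x : Int), y, (0 : Int))
        · subst ht; rw [hS'def, contains_discard']
          have hcf : S.contains ((x : Int), y, (0 : Int)) = false := by
            rw [Bool.eq_false_iff]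
            intro hcc; exact hnm ((PySem.Set.contains_iff _ _).mp hcc)
          simp [hcf, hnm]
        · exact hsame t ht
      intro e he
      rw [okCongr S' S hsame0 e]
      exact hval e (hsubS e he)
    have hcmemItem : S.contains ((x, y, 0) : Tri) = true := (PySem.Set.contains_iff _ _).mpr hmemItem
    have hsame2 : ∀ t : Tri, (S'.add (x, y, 0)).contains t = S.contains t := by
      intro t
      rw [contains_add', hS'def, contains_discard']
      by_cases ht : t = ((x : Int), y, (0 : Int))
      · subst ht; simp [hcmemItem, hmemItem]
      · simp [ht]
    have hroll : DRel ((d1.insert (x, y) false).insert (x, y) true, d2) (S'.add (x, y, 0)) := by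
      refine ⟨PySem.Dict.nodup_keys_insert _ _ _ (PySem.Dict.nodup_keys_insert _ _ _ hk1), hk2,
        PySem.Set.nodup_add _ _ hndS', ?_, ?_, ?_, ?_⟩
      · intro p; obtain ⟨pu, pv⟩ := p
        rw [PySem.Dict.getD_insert, hsame2]
        by_cases hp : ((pu, pv) : Int × Int) = (x, y)
        · rw [if_pos hp]
          have hEq3 : ((pu, pv, 0) : Tri) = (x, y, 0) := by
            simp only [Prod.mk.injEq] at hp ⊢; exact ⟨hp.1, hp.2, trivial⟩
          rw [hEq3, hcmemItem]
        · rw [if_neg hp, PySem.Dict.getD_insert, if_neg hp]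
          exact hm1 (pu, pv)
      · intro p; obtain ⟨pu, pv⟩ := p
        rw [hsame2]; exact hm2 (pu, pv)
      · intro e he
        rcases (PySem.Set.mem_add _ _ e).mp he with h' | h'
        · exact hkind' e h'
        · subst h'; left; rfl
      · exact valid_congr _ S hsame2 hval
    have hex : ¬ ∀ e ∈ (S' : List Tri), okItem S' e = true :=
      fun hA => hall (List.all_eq_true.mpr hA)
    push_neg at hex
    obtain ⟨e, heS', hef⟩ := hex
    have he3 : e = ((x : Int), y+1, (0 : Int)) ∨ e = ((x : Int), y+1, (1 : Int)) ∨
        e = ((x : Int)-1, y+1, (1 : Int)) := by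
      by_contra hno
      push_neg at hno
      have hOk := ok_changed_pillar S' S x y hsame e (hkind' e heS') hno.1 hno.2.1 hno.2.2
      exact hef (by rw [hOk]; exact hval e (hsubS e heS'))
    have hallF : ¬(S'.all (okItem S') = true) := hall
    rcases he3 with rfl | rfl | rfl
    · have hb1 : S'.contains (x, y+1, 0) = true := (PySem.Set.contains_iff _ _).mpr heS'
      have hc1f : okItem S' (x, y+1, 0) = false := Bool.eq_false_iff.mpr hef
      have hp1 : (if S'.contains (x, y+1, 0) = true then true && okItem S' (x, y+1, 0) else true)
          = false := gf_top _ _ _ hb1 hc1f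
      have hp2 : _ = false := gf_prop (S'.contains (x, y+1, 1)) (okItem S' (x, y+1, 1)) _ hp1
      have hp3 : _ = false := gf_prop (S'.contains (x-1, y+1, 1)) (okItem S' (x-1, y+1, 1)) _ hp2
      rw [hp3, if_pos (show (!false) = true from rfl), if_neg hallF]
      exact hroll
    · have hb2 : S'.contains (x, y+1, 1) = true := (PySem.Set.contains_iff _ _).mpr heS'
      have hc2f : okItem S' (x, y+1, 1) = false := Bool.eq_false_iff.mpr hef
      have hp2 : _ = false := gf_top (S'.contains (x, y+1, 1)) (okItem S' (x, y+1, 1))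
        (if S'.contains (x, y+1, 0) = true then true && okItem S' (x, y+1, 0) else true) hb2 hc2f
      have hp3 : _ = false := gf_prop (S'.contains (x-1, y+1, 1)) (okItem S' (x-1, y+1, 1)) _ hp2
      rw [hp3, if_pos (show (!false) = true from rfl), if_neg hallF]
      exact hroll
    · have hb3 : S'.contains (x-1, y+1, 1) = true := (PySem.Set.contains_iff _ _).mpr heS'
      have hc3f : okItem S' (x-1, y+1, 1) = false := Bool.eq_false_iff.mpr hef
      have hp3 : _ = false := gf_top (S'.contains (x-1, y+1, 1)) (okItem S' (x-1, y+1, 1))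
        (if S'.contains (x, y+1, 1) = true then
          (if S'.contains (x, y+1, 0) = true then true && okItem S' (x, y+1, 0) else true) &&
            okItem S' (x, y+1, 1)
        else (if S'.contains (x, y+1, 0) = true then true && okItem S' (x, y+1, 0) else true))
        hb3 hc3f
      rw [hp3, if_pos (show (!false) = true from rfl), if_neg hallF]
      exact hroll

theorem rel_del_beam (x y : Int) (d1 d2 : Dct) (S : SetT) (h : DRel (d1, d2) S) :
    DRel (delBeamA x y d1 d2) (deleteB S (x, y, 1)) := by
  obtain ⟨hk1, hk2, hnd, hm1, hm2, hkind, hval⟩ := h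
  set S' : SetT := S.discard (x, y, 1) with hS'def
  have hsame : ∀ t : Tri, t ≠ ((x : Int), y, (1 : Int)) → S'.contains t = S.contains t := by
    intro t ht; rw [hS'def, contains_discard']; simp [ht]
  have hm1' : ∀ p : Int × Int, d1.getD p false = S'.contains (p.1, p.2, 0) := by
    intro p; obtain ⟨pu, pv⟩ := p
    rw [hsame _ (by intro hEq; simp only [Prod.mk.injEq] at hEq; omega)]
    exact hm1 (pu, pv)
  have hm2' : ∀ p : Int × Int, (d2.insert (x, y) false).getD p false = S'.contains (p.1, p.2, 1) := by
    intro p; obtain ⟨pu, pv⟩ := p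
    rw [PySem.Dict.getD_insert]
    by_cases hp : ((pu, pv) : Int × Int) = (x, y)
    · rw [if_pos hp, hS'def, contains_discard']
      have hEq3 : ((pu, pv, 1) : Tri) = (x, y, 1) := by
        simp only [Prod.mk.injEq] at hp ⊢; exact ⟨hp.1, hp.2, trivial⟩
      simp [hEq3]
    · rw [if_neg hp, hsame _ (by
        intro hEq; apply hp; simp only [Prod.mk.injEq] at hEq ⊢; exact ⟨hEq.1, hEq.2.1⟩)]
      exact hm2 (pu, pv)
  have hndS' : (S' : List Tri).Nodup := PySem.Set.nodup_discard _ _ hnd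
  have hsubS : ∀ e : Tri, e ∈ (S' : List Tri) → e ∈ (S : List Tri) := by
    intro e he; exact ((PySem.Set.mem_discard _ _ _).mp he).1
  have hkind' : ∀ e ∈ (S' : List Tri), e.2.2 = 0 ∨ e.2.2 = 1 := fun e he => hkind e (hsubS e he)
  have hg1 : d1.getD (x, y) false = S'.contains (x, y, 0) := hm1' (x, y)
  have hg2 : d1.getD (x+1, y) false = S'.contains (x+1, y, 0) := hm1' (x+1, y)
  have hg3 : (d2.insert (x, y) false).getD (x-1, y) false = S'.contains (x-1, y, 1) := hm2' (x-1, y)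
  have hg4 : (d2.insert (x, y) false).getD (x+1, y) false = S'.contains (x+1, y, 1) := hm2' (x+1, y)
  have hcc1 : pos1 x y d1 (d2.insert (x, y) false) = okItem S' (x, y, 0) :=
    pos1_eq _ _ _ _ _ hm1' hm2'
  have hcc2 : pos1 (x+1) y d1 (d2.insert (x, y) false) = okItem S' (x+1, y, 0) :=
    pos1_eq _ _ _ _ _ hm1' hm2'
  have hcc3 : pos2 (x-1) y d1 (d2.insert (x, y) false) = okItem S' (x-1, y, 1) :=
    pos2_eq _ _ _ _ _ hm1' hm2'
  have hcc4 : pos2 (x+1) y d1 (d2.insert (x, y) false) = okItem S' (x+1, y, 1) :=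
    pos2_eq _ _ _ _ _ hm1' hm2'
  simp only [delBeamA, deleteB]
  rw [← hS'def, hg1, hg2, hg3, hg4, hcc1, hcc2, hcc3, hcc4]
  by_cases hall : S'.all (okItem S') = true
  · have hA : ∀ e ∈ (S' : List Tri), okItem S' e = true := List.all_eq_true.mp hall
    have hkeep : DRel (d1, d2.insert (x, y) false) S' :=
      ⟨hk1, PySem.Dict.nodup_keys_insert _ _ _ hk2, hndS', hm1', hm2', hkind', hA⟩
    have k1 : S'.contains (x, y, 0) = true → okItem S' (x, y, 0) = true :=
      fun hbb => hA _ ((PySem.Set.contains_iff _ _).mp hbb)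
    have k2 : S'.contains (x+1, y, 0) = true → okItem S' (x+1, y, 0) = true :=
      fun hbb => hA _ ((PySem.Set.contains_iff _ _).mp hbb)
    have k3 : S'.contains (x-1, y, 1) = true → okItem S' (x-1, y, 1) = true :=
      fun hbb => hA _ ((PySem.Set.contains_iff _ _).mp hbb)
    have k4 : S'.contains (x+1, y, 1) = true → okItem S' (x+1, y, 1) = true :=
      fun hbb => hA _ ((PySem.Set.contains_iff _ _).mp hbb)
    have hp1 : (if S'.contains (x, y, 0) = true then true && okItem S' (x, y, 0) else true)
        = true := gt_chain _ _ _ k1 rfl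
    have hp2 : _ = true := gt_chain (S'.contains (x+1, y, 0)) (okItem S' (x+1, y, 0)) _ k2 hp1
    have hp3 : _ = true := gt_chain (S'.contains (x-1, y, 1)) (okItem S' (x-1, y, 1)) _ k3 hp2
    have hp4 : _ = true := gt_chain (S'.contains (x+1, y, 1)) (okItem S' (x+1, y, 1)) _ k4 hp3
    rw [hp4, if_neg (by simp : ¬((!true) = true)), if_pos hall]
    exact hkeep
  · have hmemItem : ((x, y, 1) : Tri) ∈ (S : List Tri) := by
      by_contra hnm
      apply hall
      rw [List.all_eq_true]
      have hsame0 : ∀ t : Tri, S'.contains t = S.contains t := by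
        intro t
        by_cases ht : t = ((x : Int), y, (1 : Int))
        · subst ht; rw [hS'def, contains_discard']
          have hcf : S.contains ((x : Int), y, (1 : Int)) = false := by
            rw [Bool.eq_false_iff]
            intro hcc; exact hnm ((PySem.Set.contains_iff _ _).mp hcc)
          simp [hcf, hnm]
        · exact hsame t ht
      intro e he
      rw [okCongr S' S hsame0 e]
      exact hval e (hsubS e he)
    have hcmemItem : S.contains ((x, y, 1) : Tri) = true := (PySem.Set.contains_iff _ _).mpr hmemItem
    have hsame2 : ∀ t : Tri, (S'.add (x, y, 1)).contains t = S.contains t := by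
      intro t
      rw [contains_add', hS'def, contains_discard']
      by_cases ht : t = ((x : Int), y, (1 : Int))
      · subst ht; simp [hcmemItem, hmemItem]
      · simp [ht]
    have hroll : DRel (d1, (d2.insert (x, y) false).insert (x, y) true) (S'.add (x, y, 1)) := by
      refine ⟨hk1, PySem.Dict.nodup_keys_insert _ _ _ (PySem.Dict.nodup_keys_insert _ _ _ hk2),
        PySem.Set.nodup_add _ _ hndS', ?_, ?_, ?_, ?_⟩
      · intro p; obtain ⟨pu, pv⟩ := p
        rw [hsame2]; exact hm1 (pu, pv)
      · intro p; obtain ⟨pu, pv⟩ := p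
        rw [PySem.Dict.getD_insert, hsame2]
        by_cases hp : ((pu, pv) : Int × Int) = (x, y)
        · rw [if_pos hp]
          have hEq3 : ((pu, pv, 1) : Tri) = (x, y, 1) := by
            simp only [Prod.mk.injEq] at hp ⊢; exact ⟨hp.1, hp.2, trivial⟩
          rw [hEq3, hcmemItem]
        · rw [if_neg hp, PySem.Dict.getD_insert, if_neg hp]
          exact hm2 (pu, pv)
      · intro e he
        rcases (PySem.Set.mem_add _ _ e).mp he with h' | h'
        · exact hkind' e h'
        · subst h'; right; rfl
      · exact valid_congr _ S hsame2 hval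
    have hex : ¬ ∀ e ∈ (S' : List Tri), okItem S' e = true :=
      fun hA => hall (List.all_eq_true.mpr hA)
    push_neg at hex
    obtain ⟨e, heS', hef⟩ := hex
    have he4 : e = ((x : Int), y, (0 : Int)) ∨ e = ((x : Int)+1, y, (0 : Int)) ∨
        e = ((x : Int)-1, y, (1 : Int)) ∨ e = ((x : Int)+1, y, (1 : Int)) := by
      by_contra hno
      push_neg at hno
      have hOk := ok_changed_beam S' S x y hsame e (hkind' e heS') hno.1 hno.2.1 hno.2.2.1 hno.2.2.2
      exact hef (by rw [hOk]; exact hval e (hsubS e heS'))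
    have hallF : ¬(S'.all (okItem S') = true) := hall
    rcases he4 with rfl | rfl | rfl | rfl
    · have hb1 : S'.contains (x, y, 0) = true := (PySem.Set.contains_iff _ _).mpr heS'
      have hc1f : okItem S' (x, y, 0) = false := Bool.eq_false_iff.mpr hef
      have hp1 : (if S'.contains (x, y, 0) = true then true && okItem S' (x, y, 0) else true) = false := gf_top _ _ _ hb1 hc1f
      have hp2 : _ = false := gf_prop (S'.contains (x+1, y, 0)) (okItem S' (x+1, y, 0)) _ hp1
      have hp3 : _ = false := gf_prop (S'.contains (x-1, y, 1)) (okItem S' (x-1, y, 1)) _ hp2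
      have hp4 : _ = false := gf_prop (S'.contains (x+1, y, 1)) (okItem S' (x+1, y, 1)) _ hp3
      rw [hp4, if_pos (show (!false) = true from rfl), if_neg hallF]
      exact hroll
    · have hb2 : S'.contains (x+1, y, 0) = true := (PySem.Set.contains_iff _ _).mpr heS'
      have hc2f : okItem S' (x+1, y, 0) = false := Bool.eq_false_iff.mpr hef
      have hp2 : _ = false := gf_top (S'.contains (x+1, y, 0)) (okItem S' (x+1, y, 0))
        (if S'.contains (x, y, 0) = true then true && okItem S' (x, y, 0) else true) hb2 hc2f
      have hp3 : _ = false := gf_prop (S'.contains (x-1, y, 1)) (okItem S' (x-1, y, 1)) _ hp2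
      have hp4 : _ = false := gf_prop (S'.contains (x+1, y, 1)) (okItem S' (x+1, y, 1)) _ hp3
      rw [hp4, if_pos (show (!false) = true from rfl), if_neg hallF]
      exact hroll
    · have hb3 : S'.contains (x-1, y, 1) = true := (PySem.Set.contains_iff _ _).mpr heS'
      have hc3f : okItem S' (x-1, y, 1) = false := Bool.eq_false_iff.mpr hef
      have hp3 : _ = false := gf_top (S'.contains (x-1, y, 1)) (okItem S' (x-1, y, 1))
        (if S'.contains (x+1, y, 0) = true then (if S'.contains (x, y, 0) = true then true && okItem S' (x, y, 0) else true) && okItem S' (x+1, y, 0) else (if S'.contains (x, y, 0) = true then true && okItem S' (x, y, 0) else true)) hb3 hc3f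
      have hp4 : _ = false := gf_prop (S'.contains (x+1, y, 1)) (okItem S' (x+1, y, 1)) _ hp3
      rw [hp4, if_pos (show (!false) = true from rfl), if_neg hallF]
      exact hroll
    · have hb4 : S'.contains (x+1, y, 1) = true := (PySem.Set.contains_iff _ _).mpr heS'
      have hc4f : okItem S' (x+1, y, 1) = false := Bool.eq_false_iff.mpr hef
      have hp4 : _ = false := gf_top (S'.contains (x+1, y, 1)) (okItem S' (x+1, y, 1))
        (if S'.contains (x-1, y, 1) = true then (if S'.contains (x+1, y, 0) = true then (if S'.contains (x, y, 0) = true then true && okItem S' (x, y, 0) else true) && okItem S' (x+1, y, 0) else (if S'.contains (x, y, 0) = true then true && okItem S' (x, y, 0) else true)) && okItem S' (x-1, y, 1) else (if S'.contains (x+1, y, 0) = true then (if S'.contains (x, y, 0) = true then true && okItem S' (x, y, 0) else true) && okItem S' (x+1, y, 0) else (if S'.contains (x, y, 0) = true then true && okItem S' (x, y, 0) else true))) hb4 hc4f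
      rw [hp4, if_pos (show (!false) = true from rfl), if_neg hallF]
      exact hroll

theorem rel_step (st : Dct × Dct) (S : SetT) (f : List Int) (hf : f.length = 4)
    (h : DRel st S) : DRel (stepA st f) (stepB S f) := by
  obtain ⟨d1, d2⟩ := st
  rcases f with _ | ⟨x, f⟩; · simp at hf
  rcases f with _ | ⟨y, f⟩; · simp at hf
  rcases f with _ | ⟨a, f⟩; · simp at hf
  rcases f with _ | ⟨b, f⟩; · simp at hf
  rcases f with _ | ⟨c, f⟩; swap; · simp at hf
  simp only [stepA, stepB]
  by_cases hb : b ≠ 0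
  · rw [if_pos hb, if_pos hb]
    by_cases ha : a = 0
    · subst ha
      rw [if_pos rfl, if_pos rfl]
      exact rel_build_pillar x y d1 d2 S h
    · rw [if_neg ha, if_neg ha]
      exact rel_build_beam x y d1 d2 S h
  · rw [if_neg hb, if_neg hb]
    by_cases ha : a = 0
    · subst ha
      rw [if_pos rfl, if_pos rfl]
      exact rel_del_pillar x y d1 d2 S h
    · rw [if_neg ha, if_neg ha]
      exact rel_del_beam x y d1 d2 S h

theorem rel_out (st : Dct × Dct) (S : SetT) (h : DRel st S) :
    PySem.List.sorted
      (st.1.items.foldl (fun acc kv => if kv.2 then acc ++ [[kv.1.1, kv.1.2, 0]] else acc)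
        (st.2.items.foldl (fun acc kv => if kv.2 then acc ++ [[kv.1.1, kv.1.2, 1]] else acc) []))
      (fun l => l) false
    = PySem.List.sorted ((S : List Tri).map (fun e => [e.1, e.2.1, e.2.2])) (fun l => l) false := by
  obtain ⟨hk1, hk2, hnd, hm1, hm2, hkind, hval⟩ := h
  simp only [PySem.List.foldl_append_if, List.nil_append]
  have hinst : (fun (a b : List Int) => a.decidableLT b)
      = (LinearOrder.toDecidableLT : DecidableLT (List Int)) := Subsingleton.elim _ _
  rw [hinst]
  refine PySem.List.sorted_eq_sorted_of_perm (α := List Int) (κ := List Int) _ _ _ (fun a b hab => hab) ?_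
  have hitems1 : st.1.items.Nodup := List.Nodup.of_map _ hk1
  have hitems2 : st.2.items.Nodup := List.Nodup.of_map _ hk2
  have hnd2p : (List.map (fun kv => [kv.1.1, kv.1.2, (1 : Int)])
      (List.filter (fun kv => kv.2) st.2.items)).Nodup := by
    refine List.Nodup.map_on ?_ (hitems2.filter _)
    intro a ha b hb hab
    have ha2 : a.2 = true := by simpa using (List.mem_filter.mp ha).2
    have hb2 : b.2 = true := by simpa using (List.mem_filter.mp hb).2
    simp only [List.cons.injEq, and_true] at hab
    exact Prod.ext (Prod.ext hab.1 hab.2) (ha2.trans hb2.symm)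
  have hnd1p : (List.map (fun kv => [kv.1.1, kv.1.2, (0 : Int)])
      (List.filter (fun kv => kv.2) st.1.items)).Nodup := by
    refine List.Nodup.map_on ?_ (hitems1.filter _)
    intro a ha b hb hab
    have ha2 : a.2 = true := by simpa using (List.mem_filter.mp ha).2
    have hb2 : b.2 = true := by simpa using (List.mem_filter.mp hb).2
    simp only [List.cons.injEq, and_true] at hab
    exact Prod.ext (Prod.ext hab.1 hab.2) (ha2.trans hb2.symm)
  have hdisj : (List.map (fun kv => [kv.1.1, kv.1.2, (1 : Int)])
      (List.filter (fun kv => kv.2) st.2.items)).Disjoint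
      (List.map (fun kv => [kv.1.1, kv.1.2, (0 : Int)])
      (List.filter (fun kv => kv.2) st.1.items)) := by
    intro lst hl1 hl2
    obtain ⟨kv, -, rfl⟩ := List.mem_map.mp hl1
    obtain ⟨kv', -, heq⟩ := List.mem_map.mp hl2
    simp only [List.cons.injEq] at heq
    exact absurd heq.2.2.1 (by norm_num)
  have hginj : Function.Injective (fun e : Tri => [e.1, e.2.1, e.2.2]) := by
    intro a b hab
    obtain ⟨a1, a2, a3⟩ := a
    obtain ⟨b1, b2, b3⟩ := b
    simp only [List.cons.injEq, and_true] at hab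
    simp only [Prod.mk.injEq]
    exact ⟨hab.1, hab.2.1, hab.2.2⟩
  rw [List.perm_ext_iff_of_nodup (List.Nodup.append hnd2p hnd1p hdisj) (hnd.map hginj)]
  intro lst
  constructor
  · intro hmem
    rcases List.mem_append.mp hmem with hmem | hmem
    · obtain ⟨kv, hkvf, rfl⟩ := List.mem_map.mp hmem
      obtain ⟨hkvmem, hkvt⟩ := List.mem_filter.mp hkvf
      have hkvtrue : kv.2 = true := by simpa using hkvt
      have hget : st.2.getD kv.1 false = true := by
        have hq : st.2.get? kv.1 = some kv.2 := PySem.Dict.get?_of_mem_items _ hkvmem hk2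
        rw [PySem.Dict.getD_eq_get?_getD, hq]
        exact hkvtrue
      have hcont : S.contains (kv.1.1, kv.1.2, 1) = true := by rw [← hm2 kv.1]; exact hget
      exact List.mem_map.mpr ⟨(kv.1.1, kv.1.2, 1), (mem_iff_contains _ _).mpr hcont, rfl⟩
    · obtain ⟨kv, hkvf, rfl⟩ := List.mem_map.mp hmem
      obtain ⟨hkvmem, hkvt⟩ := List.mem_filter.mp hkvf
      have hkvtrue : kv.2 = true := by simpa using hkvt
      have hget : st.1.getD kv.1 false = true := by
        have hq : st.1.get? kv.1 = some kv.2 := PySem.Dict.get?_of_mem_items _ hkvmem hk1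
        rw [PySem.Dict.getD_eq_get?_getD, hq]
        exact hkvtrue
      have hcont : S.contains (kv.1.1, kv.1.2, 0) = true := by rw [← hm1 kv.1]; exact hget
      exact List.mem_map.mpr ⟨(kv.1.1, kv.1.2, 0), (mem_iff_contains _ _).mpr hcont, rfl⟩
  · intro hmem
    obtain ⟨e, heS, rfl⟩ := List.mem_map.mp hmem
    obtain ⟨u, v, k⟩ := e
    rcases hkind _ heS with hk0 | hk0 <;> simp only at hk0 <;> subst hk0
    · have hcont : S.contains (u, v, 0) = true := (mem_iff_contains _ _).mp heS
      have hget : st.1.getD (u, v) false = true := by rw [hm1 (u, v)]; exact hcont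
      have hkey : ((u, v) : Int × Int) ∈ st.1.keys := by
        by_contra hnk
        have hcf : st.1.contains (u, v) = false := by
          cases hcc : st.1.contains (u, v)
          · rfl
          · exact absurd ((PySem.Dict.contains_iff_mem_keys _ _).mp hcc) hnk
        rw [PySem.Dict.getD_of_not_contains _ _ hcf] at hget
        exact absurd hget (by simp)
      have hitem : (((u, v), true) : (Int × Int) × Bool) ∈ st.1.items := by
        rw [PySem.Dict.items_eq_map_keys st.1 hk1 false]
        exact List.mem_map.mpr ⟨(u, v), hkey, by rw [hget]⟩
      refine List.mem_append.mpr (Or.inr ?_)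
      exact List.mem_map.mpr ⟨((u, v), true), List.mem_filter.mpr ⟨hitem, rfl⟩, rfl⟩
    · have hcont : S.contains (u, v, 1) = true := (mem_iff_contains _ _).mp heS
      have hget : st.2.getD (u, v) false = true := by rw [hm2 (u, v)]; exact hcont
      have hkey : ((u, v) : Int × Int) ∈ st.2.keys := by
        by_contra hnk
        have hcf : st.2.contains (u, v) = false := by
          cases hcc : st.2.contains (u, v)
          · rfl
          · exact absurd ((PySem.Dict.contains_iff_mem_keys _ _).mp hcc) hnk
        rw [PySem.Dict.getD_of_not_contains _ _ hcf] at hget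
        exact absurd hget (by simp)
      have hitem : (((u, v), true) : (Int × Int) × Bool) ∈ st.2.items := by
        rw [PySem.Dict.items_eq_map_keys st.2 hk2 false]
        exact List.mem_map.mpr ⟨(u, v), hkey, by rw [hget]⟩
      refine List.mem_append.mpr (Or.inl ?_)
      exact List.mem_map.mpr ⟨((u, v), true), List.mem_filter.mpr ⟨hitem, rfl⟩, rfl⟩

-- ===== VERDICT (by name: the statement is the Claim_ definition above) =====
theorem solution_spec : Claim_equal_solution := by
  intro n bf _hdom hpre
  unfold Spec_solution solution solution_alt
  have step : ∀ (l : List (List Int)), (∀ f ∈ l, f.length = 4) →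
      ∀ st S, DRel st S → DRel (l.foldl stepA st) (l.foldl stepB S) := by
    intro l
    induction l with
    | nil => intro _ st S h; simpa using h
    | cons f t ih =>
      intro hl st S h
      simp only [List.foldl_cons]
      exact ih (fun g hg => hl g (List.mem_cons_of_mem _ hg)) _ _
        (rel_step st S f (hl f (List.mem_cons_self)) h)
  have base : DRel (PySem.Dict.empty, PySem.Dict.empty) PySem.Set.empty := by
    exact ⟨List.nodup_nil, List.nodup_nil, List.nodup_nil, fun p => rfl, fun p => rfl,
      fun e he => absurd he (List.not_mem_nil), fun e he => absurd he (List.not_mem_nil)⟩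
  simpa using rel_out _ _ (step bf hpre _ _ base)
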